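-- pv_equiv track=rewrite | github.com/cbg-ethz/VILOCA | viloca/b2w.py | update_tiling
-- ===== SOURCE A (Python) =====
-- def update_tiling(tiling, extended_window_mode, max_ins_at_pos):
--     """
--     input tiling:
--     window_start is 1-based
--     max_ins_at_pos is 0-based
--
--     return: tiling = [
--             (window_start, original_window_length, control_window_length)
--             for each window
--             ]
--     """
--     updated_tiling = []
--
--     for idx, (window_start, window_length) in enumerate(tiling):
--         original_window_length = window_length
--         if extended_window_mode:
--             for pos, val in max_ins_at_pos.items():
--                 if window_start - 1 <= pos < window_start - 1 + original_window_length: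
--                     window_length += val
--             updated_tiling.append((window_start,original_window_length, window_length))
--         else:
--             updated_tiling.append((window_start,original_window_length, window_length))
--
--     return updated_tiling
-- ===== SOURCE B (Python) =====
-- def _bisect_left(a, x):
--     lo, hi = 0, len(a)
--     while lo < hi:
--         mid = (lo + hi) // 2
--         if a[mid] < x:
--             lo = mid + 1
--         else:
--             hi = mid
--     return lo
--
--
-- def update_tiling(tiling, extended_window_mode, max_ins_at_pos):
--     if not extended_window_mode:
--         return [(ws, wl, wl) for ws, wl in tiling]
--     items = sorted(max_ins_at_pos.items(), key=lambda it: it[0])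
--     pos = [p for p, _ in items]
--     pre = [0]
--     acc = 0
--     for _, v in items:
--         acc += v
--         pre.append(acc)
--     out = []
--     for ws, wl in tiling:
--         lo = ws - 1
--         hi = max(lo, lo + wl)  # empty range when the window length is <= 0
--         i = _bisect_left(pos, lo)
--         j = _bisect_left(pos, hi)
--         out.append((ws, wl, wl + pre[j] - pre[i]))
--     return out
-- ===== Notes on version B (the rewrite author's own statement) =====
-- stated objective: alternative
-- what changed: Replaces the per-window linear scan over all insertion positions by sorting the positions once, building a prefix-sum array, and binary-searching each window's [start-1, start-1+len) range so the in-window sum is a difference of two prefix sums.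
import Mathlib
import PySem

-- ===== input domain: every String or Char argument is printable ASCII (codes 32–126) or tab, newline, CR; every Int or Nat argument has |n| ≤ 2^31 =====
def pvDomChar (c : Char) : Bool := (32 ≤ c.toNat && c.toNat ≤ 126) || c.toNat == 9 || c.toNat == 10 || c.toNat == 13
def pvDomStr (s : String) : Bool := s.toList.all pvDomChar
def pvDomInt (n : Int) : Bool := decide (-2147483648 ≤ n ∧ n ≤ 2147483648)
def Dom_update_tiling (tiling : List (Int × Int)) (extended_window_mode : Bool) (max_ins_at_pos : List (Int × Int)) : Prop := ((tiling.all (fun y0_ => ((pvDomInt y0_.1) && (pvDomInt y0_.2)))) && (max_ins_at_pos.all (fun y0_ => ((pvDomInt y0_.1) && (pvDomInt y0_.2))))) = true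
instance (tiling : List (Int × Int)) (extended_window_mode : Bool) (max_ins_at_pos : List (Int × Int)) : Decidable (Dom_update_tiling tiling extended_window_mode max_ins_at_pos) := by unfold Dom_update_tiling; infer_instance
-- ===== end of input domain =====

-- B replaces A's per-window scan of all insertion positions by sort + prefix sums + binary search (objective: alternative algorithm).


-- ===== PORT A =====
def update_tiling (tiling : List (Int × Int)) (extended_window_mode : Bool) (max_ins_at_pos : List (Int × Int)) : List (Int × Int × Int) :=
  tiling.foldl (fun updated_tiling wswl =>
    let window_start := wswl.1
    let original_window_length := wswl.2
    if extended_window_mode then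
      let window_length := max_ins_at_pos.foldl
        (fun window_length pv =>
          if window_start - 1 ≤ pv.1 ∧ pv.1 < window_start - 1 + original_window_length then
            window_length + pv.2
          else window_length)
        original_window_length
      updated_tiling ++ [(window_start, original_window_length, window_length)]
    else
      updated_tiling ++ [(window_start, original_window_length, original_window_length)]) []

-- ===== PORT B =====
-- hand-written binary search, transliterating Source B's _bisect_left loop
def pvBlAux (a : List Int) (x : Int) (lo hi : Nat) : Nat :=
  if _h : lo < hi then
    let mid := (lo + hi) / 2
    if a.getD mid 0 < x then pvBlAux a x (mid + 1) hi else pvBlAux a x lo mid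
  else lo
termination_by hi - lo
decreasing_by all_goals omega

def pvBisectLeft (a : List Int) (x : Int) : Nat := pvBlAux a x 0 a.length

def update_tiling_alt (tiling : List (Int × Int)) (extended_window_mode : Bool) (max_ins_at_pos : List (Int × Int)) : List (Int × Int × Int) :=
  if !extended_window_mode then
    tiling.map (fun wswl => (wswl.1, wswl.2, wswl.2))
  else
    let items := PySem.List.sorted max_ins_at_pos (fun it => it.1)
    let pos := items.map (fun it => it.1)
    let pre := (items.foldl (fun st it => (st.1 + it.2, st.2 ++ [st.1 + it.2])) (0, [(0 : Int)])).2
    tiling.foldl (fun out wswl =>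
      let ws := wswl.1
      let wl := wswl.2
      let lo := ws - 1
      let hi := max lo (lo + wl)  -- empty range when the window length is <= 0
      let i := pvBisectLeft pos lo
      let j := pvBisectLeft pos hi
      out ++ [(ws, wl, wl + pre.getD j 0 - pre.getD i 0)]) []

-- ===== PRECONDITION & SPEC =====
def Spec_update_tiling (tiling : List (Int × Int)) (extended_window_mode : Bool) (max_ins_at_pos : List (Int × Int)) (out : List (Int × Int × Int)) : Prop := out = update_tiling_alt tiling extended_window_mode max_ins_at_pos
instance (tiling : List (Int × Int)) (extended_window_mode : Bool) (max_ins_at_pos : List (Int × Int)) (out : List (Int × Int × Int)) : Decidable (Spec_update_tiling tiling extended_window_mode max_ins_at_pos out) := by unfold Spec_update_tiling; infer_instance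

-- ===== CLAIM (what is proved, stated in full; the proofs are below) =====
def Claim_equal_update_tiling : Prop := ∀ (tiling : List (Int × Int)) (extended_window_mode : Bool) (max_ins_at_pos : List (Int × Int)), Dom_update_tiling tiling extended_window_mode max_ins_at_pos → Spec_update_tiling tiling extended_window_mode max_ins_at_pos (update_tiling tiling extended_window_mode max_ins_at_pos)

-- ===== LEMMAS AND PROOFS =====

-- sum of the second components
def pvV (l : List (Int × Int)) : Int := (l.map (fun pv => pv.2)).sum

-- the prefix-sum tail produced by the fold in port B
def pvPresums (a : Int) : List (Int × Int) → List Int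
  | [] => []
  | it :: t => (a + it.2) :: pvPresums (a + it.2) t

theorem pvPresums_foldl (l : List (Int × Int)) (a : Int) (p : List Int) :
    (l.foldl (fun st it => (st.1 + it.2, st.2 ++ [st.1 + it.2])) (a, p)).2 = p ++ pvPresums a l := by
  induction l generalizing a p with
  | nil => simp [pvPresums]
  | cons it t ih => simp [pvPresums, ih, List.append_assoc]

theorem pvPresums_getD (l : List (Int × Int)) (a : Int) (k : Nat) (hk : k ≤ l.length) :
    (a :: pvPresums a l).getD k 0 = a + pvV (l.take k) := by
  induction l generalizing a k with
  | nil =>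
    have : k = 0 := by simpa using hk
    subst this
    simp [pvV]
  | cons it t ih =>
    cases k with
    | zero => simp [pvV]
    | succ k' =>
      have := ih (a + it.2) k' (by simpa using hk)
      simpa [pvPresums, pvV, add_assoc] using this
  
-- the inner accumulation loop of port A is a filtered sum
theorem pvFoldl_add_if (l : List (Int × Int)) (init : Int) (p : Int × Int → Prop) [DecidablePred p] :
    l.foldl (fun w pv => if p pv then w + pv.2 else w) init
      = init + pvV (l.filter (fun pv => decide (p pv))) := by
  induction l generalizing init with
  | nil => simp [pvV]
  | cons it t ih =>
    by_cases h : p it <;> simp [h, ih, pvV, add_assoc]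

-- my transliterated bisect satisfies the bisect_left spec on a sorted list
theorem pvBlAux_spec (a : List Int) (x : Int) (hs : a.Pairwise (· ≤ ·)) :
    ∀ n lo hi, hi - lo ≤ n → hi ≤ a.length → lo ≤ hi →
      (∀ j (hj : j < a.length), j < lo → a[j] < x) →
      (∀ j (hj : j < a.length), hi ≤ j → x ≤ a[j]) →
      pvBlAux a x lo hi ≤ a.length ∧
      (∀ j (hj : j < a.length), j < pvBlAux a x lo hi → a[j] < x) ∧
      (∀ j (hj : j < a.length), pvBlAux a x lo hi ≤ j → x ≤ a[j]) := by
  intro n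
  induction n with
  | zero =>
    intro lo hi hfuel hhi hlohi hlow hhigh
    have hle : ¬ lo < hi := by omega
    rw [pvBlAux]
    simp only [dif_neg hle]
    exact ⟨by omega, fun j hj hjlo => hlow j hj hjlo, fun j hj hjlo => hhigh j hj (by omega)⟩
  | succ n ih =>
    intro lo hi hfuel hhi hlohi hlow hhigh
    by_cases hlh : lo < hi
    · have hmid : (lo + hi) / 2 < a.length := by omega
      have hmidv : a.getD ((lo + hi) / 2) 0 = a[(lo + hi) / 2] := List.getD_eq_getElem a 0 hmid
      rw [pvBlAux]
      simp only [dif_pos hlh]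
      split_ifs with hlt
      · refine ih ((lo + hi) / 2 + 1) hi (by omega) hhi (by omega) ?_ hhigh
        intro j hj hjm
        have hle : a[j] ≤ a[(lo + hi) / 2] := by
          rcases Nat.lt_or_ge j ((lo + hi) / 2) with hc | hc
          · exact (List.pairwise_iff_getElem.mp hs) j _ hj hmid hc
          · have : j = (lo + hi) / 2 := by omega
            subst this; exact le_refl _
        rw [hmidv] at hlt
        omega
      · refine ih lo ((lo + hi) / 2) (by omega) (by omega) (by omega) hlow ?_
        intro j hj hjm
        have hle : a[(lo + hi) / 2] ≤ a[j] := by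
          rcases Nat.lt_or_ge ((lo + hi) / 2) j with hc | hc
          · exact (List.pairwise_iff_getElem.mp hs) _ j hmid hj hc
          · have : j = (lo + hi) / 2 := by omega
            subst this; exact le_refl _
        rw [hmidv] at hlt
        omega
    · rw [pvBlAux]
      simp only [dif_neg hlh]
      exact ⟨by omega, fun j hj hjlo => hlow j hj hjlo, fun j hj hjlo => hhigh j hj (by omega)⟩

theorem pvBisectLeft_spec (a : List Int) (x : Int) (hs : a.Pairwise (· ≤ ·)) :
    pvBisectLeft a x ≤ a.length ∧
    (∀ j (hj : j < a.length), j < pvBisectLeft a x → a[j] < x) ∧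
    (∀ j (hj : j < a.length), pvBisectLeft a x ≤ j → x ≤ a[j]) := by
  exact pvBlAux_spec a x hs a.length 0 a.length (by omega) (le_refl _) (Nat.zero_le _)
    (fun j hj hje => by omega) (fun j hj hje => by omega)

-- on a (weakly) key-sorted list, the elements before the bisect index are exactly those with key < x
theorem pvTake_eq_filter_lt (x : Int) :
    ∀ (l : List (Int × Int)) (i : Nat), i ≤ l.length →
      (∀ j (hj : j < l.length), j < i → l[j].1 < x) →
      (∀ j (hj : j < l.length), i ≤ j → x ≤ l[j].1) →
      l.take i = l.filter (fun pv => decide (pv.1 < x)) := by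
  intro l
  induction l with
  | nil => intro i _ _ _; simp
  | cons h t ih =>
    intro i hi hlow hhigh
    cases i with
    | zero =>
      have hx : x ≤ h.1 := hhigh 0 (by simp) (by omega)
      have : (h :: t).filter (fun pv => decide (pv.1 < x)) = [] := by
        rw [List.filter_eq_nil_iff]
        intro pv hpv
        simp only [List.mem_cons] at hpv
        rcases hpv with rfl | hpv
        · simp; omega
        · obtain ⟨j, hj, rfl⟩ := List.getElem_of_mem hpv
          have := hhigh (j + 1) (by simpa using Nat.succ_lt_succ hj) (by omega)
          simp at this ⊢
          omega
      simp [this]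
    | succ i' =>
      have hh : h.1 < x := by
        have := hlow 0 (by simp) (by omega)
        simpa using this
      have ht : t.take i' = t.filter (fun pv => decide (pv.1 < x)) := by
        refine ih i' (by simpa using hi) ?_ ?_
        · intro j hj hji
          have := hlow (j + 1) (by simpa using Nat.succ_lt_succ hj) (by omega)
          simpa using this
        · intro j hj hji
          have := hhigh (j + 1) (by simpa using Nat.succ_lt_succ hj) (by omega)
          simpa using this
      simp [List.take_succ_cons, hh, ht]

-- sum decomposition: sums below hi split at lo
theorem pvV_filter_split (lo hi : Int) (hlh : lo ≤ hi) :
    ∀ l : List (Int × Int),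
      pvV (l.filter (fun pv => decide (pv.1 < hi)))
        = pvV (l.filter (fun pv => decide (pv.1 < lo)))
          + pvV (l.filter (fun pv => decide (lo ≤ pv.1 ∧ pv.1 < hi))) := by
  intro l
  induction l with
  | nil => simp [pvV]
  | cons h t ih =>
    by_cases h1 : h.1 < hi <;> by_cases h2 : h.1 < lo <;>
      simp [List.filter_cons, h1, h2, pvV] <;>
      first
        | (simp [show lo ≤ h.1 ∧ h.1 < hi from by omega, pvV] at ih ⊢; omega)
        | (simp [show ¬ (lo ≤ h.1 ∧ h.1 < hi) from by omega, pvV] at ih ⊢; omega)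

-- pvV of a filter is invariant under permutation
theorem pvV_filter_perm (l l' : List (Int × Int)) (hp : l.Perm l') (q : Int × Int → Bool) :
    pvV (l.filter q) = pvV (l'.filter q) :=
  List.Perm.sum_eq (List.Perm.map _ (List.Perm.filter q hp))

-- the per-window value computed by port B equals port A's inner loop result
theorem pvWindow_eq (max_ins_at_pos : List (Int × Int)) (ws owl : Int) :
    (let items := PySem.List.sorted max_ins_at_pos (fun it => it.1)
     let pos := items.map (fun it => it.1)
     let pre := (items.foldl (fun st it => (st.1 + it.2, st.2 ++ [st.1 + it.2])) (0, [(0 : Int)])).2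
     owl + pre.getD (pvBisectLeft pos (max (ws - 1) (ws - 1 + owl))) 0
         - pre.getD (pvBisectLeft pos (ws - 1)) 0)
    = max_ins_at_pos.foldl
        (fun window_length pv =>
          if ws - 1 ≤ pv.1 ∧ pv.1 < ws - 1 + owl then window_length + pv.2 else window_length)
        owl := by
  set items := PySem.List.sorted max_ins_at_pos (fun it => it.1) with hitems
  have hperm : items.Perm max_ins_at_pos := PySem.List.sorted_perm max_ins_at_pos (fun it => it.1) false
  have hpair : items.Pairwise (fun a b => a.1 ≤ b.1) :=
    PySem.List.sorted_pairwise max_ins_at_pos (fun it => it.1)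
  set pos := items.map (fun it => it.1) with hpos
  have hpospair : pos.Pairwise (· ≤ ·) := by
    rw [hpos, List.pairwise_map]; exact hpair
  have hposlen : pos.length = items.length := by simp [hpos]
  have hpre : (items.foldl (fun st it => (st.1 + it.2, st.2 ++ [st.1 + it.2])) (0, [(0 : Int)])).2
      = (0 : Int) :: pvPresums 0 items := by
    simpa using pvPresums_foldl items 0 [(0 : Int)]
  -- index facts
  have keyfact : ∀ x : Int, ∀ jx : Nat, jx = pvBisectLeft pos x →
      ((0 : Int) :: pvPresums 0 items).getD jx 0 = pvV (items.filter (fun pv => decide (pv.1 < x))) := by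
    intro x jx hjx
    obtain ⟨hle, hlow, hhigh⟩ := pvBisectLeft_spec pos x hpospair
    rw [hjx]
    have hb : pvBisectLeft pos x ≤ items.length := by omega
    rw [pvPresums_getD items 0 _ hb]
    have htake : items.take (pvBisectLeft pos x) = items.filter (fun pv => decide (pv.1 < x)) := by
      refine pvTake_eq_filter_lt x items _ hb ?_ ?_
      · intro j hj hji
        have := hlow j (by omega) hji
        simpa [hpos] using this
      · intro j hj hji
        have := hhigh j (by omega) hji
        simpa [hpos] using this
    rw [htake]; ring_nf
  rw [pvFoldl_add_if max_ins_at_pos owl (fun pv => ws - 1 ≤ pv.1 ∧ pv.1 < ws - 1 + owl)]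
  simp only [hpre]
  rw [keyfact (max (ws - 1) (ws - 1 + owl)) _ rfl, keyfact (ws - 1) _ rfl]
  have hsplit := pvV_filter_split (ws - 1) (max (ws - 1) (ws - 1 + owl)) (le_max_left _ _) items
  have hcond : items.filter (fun pv => decide (ws - 1 ≤ pv.1 ∧ pv.1 < max (ws - 1) (ws - 1 + owl)))
      = items.filter (fun pv => decide (ws - 1 ≤ pv.1 ∧ pv.1 < ws - 1 + owl)) := by
    apply List.filter_congr
    intro pv _
    simp only [decide_eq_decide]
    omega
  rw [hcond] at hsplit
  have hAB : pvV (items.filter (fun pv => decide (ws - 1 ≤ pv.1 ∧ pv.1 < ws - 1 + owl)))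
      = pvV (max_ins_at_pos.filter (fun pv => decide (ws - 1 ≤ pv.1 ∧ pv.1 < ws - 1 + owl))) :=
    pvV_filter_perm items max_ins_at_pos hperm _
  omega

-- ===== VERDICT (by name: the statement is the Claim_ definition above) =====
theorem update_tiling_spec : Claim_equal_update_tiling := by
  intro tiling ewm maxins _
  unfold Spec_update_tiling update_tiling update_tiling_alt
  cases ewm with
  | false =>
    simp only [Bool.not_false, reduceIte, Bool.false_eq_true]
    rw [PySem.List.foldl_append_singleton_eq_map]
    simp
  | true =>
    simp only [Bool.not_true, reduceIte]
    rw [PySem.List.foldl_append_singleton_eq_map, PySem.List.foldl_append_singleton_eq_map]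
    simp only [List.nil_append]
    apply List.map_congr_left
    intro wswl _
    have := pvWindow_eq maxins wswl.1 wswl.2
    simp only at this
    rw [← this]
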